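-- pv_equiv track=rewrite | github.com/diplomatiegouvfr/bna | code_source/traitement_1/grammaire.py | verif_verb
-- ===== SOURCE A (Python) =====
-- def verif_verb(verbs, texte):
--     lenV = len(verbs)
--     lenT = len(texte)
--     v = {}
--     for j in range(0,lenT):
--         if j not in verbs:
--             v[j] = "NULL"
--         else:
--             v[j] = verbs[j]
--     return v
-- ===== SOURCE B (Python) =====
-- def verif_verb(verbs, texte):
--     v = {j: "NULL" for j in range(len(texte))}
--     for k in verbs:
--         if k in v:
--             v[k] = verbs[k]
--     return v
-- ===== Notes on version B (the rewrite author's own statement) =====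
-- stated objective: simpler
-- what changed: Instead of a per-index membership branch, B initializes the whole table to NULL with a comprehension and then makes a second pass over verbs' keys, overriding only entries that fall inside the index range.
import Mathlib
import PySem

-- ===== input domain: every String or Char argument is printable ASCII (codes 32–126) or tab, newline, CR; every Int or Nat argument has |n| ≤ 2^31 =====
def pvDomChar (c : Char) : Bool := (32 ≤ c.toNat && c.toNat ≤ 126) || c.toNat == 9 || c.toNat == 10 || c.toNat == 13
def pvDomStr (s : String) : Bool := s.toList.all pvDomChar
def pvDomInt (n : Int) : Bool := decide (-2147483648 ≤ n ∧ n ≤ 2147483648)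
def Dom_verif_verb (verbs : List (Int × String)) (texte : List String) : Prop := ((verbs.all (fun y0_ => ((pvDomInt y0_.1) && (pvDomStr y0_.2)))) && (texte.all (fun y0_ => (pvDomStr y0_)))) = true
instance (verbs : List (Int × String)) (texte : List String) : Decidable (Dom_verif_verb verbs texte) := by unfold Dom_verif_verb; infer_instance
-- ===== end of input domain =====

-- B replaces A's per-index membership branch by initialize-all-to-NULL then a selective
-- override pass over verbs' keys (different decomposition; same result, similar cost).


-- ===== PORT A =====
-- for j in range(0, lenT): if j not in verbs: v[j] = "NULL" else: v[j] = verbs[j]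
def verif_verb (verbs : List (Int × String)) (texte : List String) : List (Int × String) :=
  let vd : PySem.Dict Int String := PySem.Dict.mk verbs
  let lenT : Int := texte.length
  ((PySem.List.pyRange 0 lenT 1).foldl
    (fun d j => if vd.contains j = false then d.insert j "NULL" else d.insert j (vd.getD j "NULL"))
    PySem.Dict.empty).items

-- ===== PORT B =====
-- the body of B's second loop: for k in verbs: if k in v: v[k] = verbs[k]
def vvOverride (vd d : PySem.Dict Int String) (k : Int) : PySem.Dict Int String :=
  if d.contains k then d.insert k (vd.getD k "NULL") else d

def verif_verb_alt (verbs : List (Int × String)) (texte : List String) : List (Int × String) :=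
  let vd : PySem.Dict Int String := PySem.Dict.mk verbs
  -- v = {j: "NULL" for j in range(len(texte))}
  let base : PySem.Dict Int String :=
    (PySem.List.pyRange 0 (texte.length : Int) 1).foldl (fun d j => d.insert j "NULL") PySem.Dict.empty
  (vd.keys.foldl (vvOverride vd) base).items

-- ===== PRECONDITION & SPEC =====
def Spec_verif_verb (verbs : List (Int × String)) (texte : List String) (out : List (Int × String)) : Prop := out = verif_verb_alt verbs texte
instance (verbs : List (Int × String)) (texte : List String) (out : List (Int × String)) : Decidable (Spec_verif_verb verbs texte out) := by unfold Spec_verif_verb; infer_instance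

-- ===== CLAIM (what is proved, stated in full; the proofs are below) =====
def Claim_equal_verif_verb : Prop := ∀ (verbs : List (Int × String)) (texte : List String), Dom_verif_verb verbs texte → Spec_verif_verb verbs texte (verif_verb verbs texte)

-- ===== LEMMAS AND PROOFS =====

-- A's loop inserts fresh, strictly increasing keys, so its items list is a map over the range.
theorem vv_A_items (vd : PySem.Dict Int String) (n : Int) :
    ((PySem.List.pyRange 0 n 1).foldl
      (fun d j => if vd.contains j = false then d.insert j "NULL" else d.insert j (vd.getD j "NULL"))
      PySem.Dict.empty).items
    = (PySem.List.pyRange 0 n 1).map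
        (fun j => (j, if vd.contains j then vd.getD j "NULL" else "NULL")) := by
  have hf : (fun (d : PySem.Dict Int String) j =>
      if vd.contains j = false then d.insert j "NULL" else d.insert j (vd.getD j "NULL"))
      = (fun d j => d.insert j (if vd.contains j then vd.getD j "NULL" else "NULL")) := by
    funext d j
    by_cases h : vd.contains j <;> simp [h]
  rw [hf]
  have := PySem.Dict.items_foldl_insert_fresh (l := PySem.List.pyRange 0 n 1)
    (k := fun j => j) (v := fun j => if vd.contains j then vd.getD j "NULL" else "NULL")
    (d := PySem.Dict.empty)
    (by intro a _; exact PySem.Dict.contains_empty a)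
    (by simpa using PySem.List.nodup_pyRange_one 0 n)
  simpa using this

-- B's base comprehension, as items.
theorem vv_base_items (n : Int) :
    ((PySem.List.pyRange 0 n 1).foldl
      (fun (d : PySem.Dict Int String) j => d.insert j "NULL") PySem.Dict.empty).items
    = (PySem.List.pyRange 0 n 1).map (fun j => (j, "NULL")) := by
  have := PySem.Dict.items_foldl_insert_fresh (l := PySem.List.pyRange 0 n 1)
    (k := fun j => j) (v := fun _ => ("NULL" : String))
    (d := PySem.Dict.empty)
    (by intro a _; exact PySem.Dict.contains_empty a)
    (by simpa using PySem.List.nodup_pyRange_one 0 n)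
  simpa using this

-- one override step, expressed on the items list
theorem vv_step_items (vd d : PySem.Dict Int String) (k : Int) :
    (vvOverride vd d k).items
    = d.items.map (fun p => if p.1 = k then (k, vd.getD k "NULL") else p) := by
  unfold vvOverride
  by_cases h : d.contains k
  · rw [if_pos h, PySem.Dict.items_insert_of_contains _ _ h]
    apply List.map_congr_left
    intro p _
    by_cases hp : p.1 = k <;> simp [hp]
  · rw [if_neg h]
    have hmap : ∀ p ∈ d.items, (if p.1 = k then (k, vd.getD k "NULL") else p) = p := by
      intro p hp
      rw [if_neg]
      intro hpk
      have hmemk : p.1 ∈ d.keys := by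
        simp only [PySem.Dict.keys]
        exact List.mem_map_of_mem hp
      have : d.contains k = true := by
        rw [PySem.Dict.contains_iff_mem_keys]
        exact hpk ▸ hmemk
      simp [this] at h
    rw [List.map_congr_left hmap]; simp

-- the whole override loop, expressed on the items list
theorem vv_loop_items (vd : PySem.Dict Int String) (ks : List Int) (d : PySem.Dict Int String) :
    (ks.foldl (vvOverride vd) d).items
    = d.items.map (fun p => if p.1 ∈ ks then (p.1, vd.getD p.1 "NULL") else p) := by
  induction ks generalizing d with
  | nil =>
    simp
  | cons k ks ih =>
    rw [List.foldl_cons, ih, vv_step_items, List.map_map]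
    apply List.map_congr_left
    intro p _
    by_cases hpk : p.1 = k
    · subst hpk
      by_cases hmem : p.1 ∈ ks <;> simp [hmem]
    · by_cases hmem : p.1 ∈ ks <;> simp [hpk, hmem]

-- ===== VERDICT (by name: the statement is the Claim_ definition above) =====
theorem verif_verb_spec : Claim_equal_verif_verb := by
  intro verbs texte _
  show verif_verb verbs texte = verif_verb_alt verbs texte
  unfold verif_verb verif_verb_alt
  rw [vv_A_items, vv_loop_items, vv_base_items, List.map_map]
  apply List.map_congr_left
  intro j _
  simp only [Function.comp_apply]
  by_cases h : (PySem.Dict.mk verbs).contains j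
  · have hm : j ∈ (PySem.Dict.mk verbs).keys := (PySem.Dict.contains_iff_mem_keys _ _).mp h
    rw [if_pos h, if_pos hm]
  · have hm : j ∉ (PySem.Dict.mk verbs).keys := by
      intro hmem
      exact h ((PySem.Dict.contains_iff_mem_keys _ _).mpr hmem)
    rw [if_neg h, if_neg hm]
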